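-- pv_equiv track=rewrite | github.com/gebeyehu08/Objective_Data-analytics-python | modelhub/tests_modelhub/checklock_holmes/checklock_holmes/output_history/handler.py | _merge_histories
-- ===== SOURCE A (Python) =====
-- from typing import Dict, List, Union
--
-- HistoryType = Dict[str, Dict[str, Dict[str, str]]]
--
-- def _merge_histories(old_history: HistoryType, new_history: HistoryType) -> HistoryType:
--     for nb_name, engine_x_checks in old_history.items():
--         if nb_name not in new_history:
--             new_history[nb_name] = engine_x_checks
--             continue
--         for engine, checks in engine_x_checks.items():
--             if engine not in new_history[nb_name]:
--                 new_history[nb_name][engine] = checks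
--                 continue
--             for date_key, check_id in checks.items():
--                 if date_key not in new_history[nb_name][engine]:
--                     new_history[nb_name][engine][date_key] = check_id
--
--     return new_history
-- ===== SOURCE B (Python) =====
-- def _merge_histories(old_history, new_history):
--     """Depth-counted recursive merge: same result (and in-place mutation of
--     new_history) as the three nested loops, via one generic helper."""
--     def merge(old, new, depth):
--         for key, value in old.items():
--             if key not in new:
--                 new[key] = value
--             elif depth > 1:
--                 merge(value, new[key], depth - 1)
--     merge(old_history, new_history, 3)
--     return new_history
-- ===== Notes on version B (the rewrite author's own statement) =====
-- stated objective: simpler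
-- what changed: Replaces the three hand-written nested loops over the fixed levels by one recursive helper merge(old, new, depth) that threads a depth counter (depth=3), bottoming out at depth 1 in set-or-skip.
import Mathlib
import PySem

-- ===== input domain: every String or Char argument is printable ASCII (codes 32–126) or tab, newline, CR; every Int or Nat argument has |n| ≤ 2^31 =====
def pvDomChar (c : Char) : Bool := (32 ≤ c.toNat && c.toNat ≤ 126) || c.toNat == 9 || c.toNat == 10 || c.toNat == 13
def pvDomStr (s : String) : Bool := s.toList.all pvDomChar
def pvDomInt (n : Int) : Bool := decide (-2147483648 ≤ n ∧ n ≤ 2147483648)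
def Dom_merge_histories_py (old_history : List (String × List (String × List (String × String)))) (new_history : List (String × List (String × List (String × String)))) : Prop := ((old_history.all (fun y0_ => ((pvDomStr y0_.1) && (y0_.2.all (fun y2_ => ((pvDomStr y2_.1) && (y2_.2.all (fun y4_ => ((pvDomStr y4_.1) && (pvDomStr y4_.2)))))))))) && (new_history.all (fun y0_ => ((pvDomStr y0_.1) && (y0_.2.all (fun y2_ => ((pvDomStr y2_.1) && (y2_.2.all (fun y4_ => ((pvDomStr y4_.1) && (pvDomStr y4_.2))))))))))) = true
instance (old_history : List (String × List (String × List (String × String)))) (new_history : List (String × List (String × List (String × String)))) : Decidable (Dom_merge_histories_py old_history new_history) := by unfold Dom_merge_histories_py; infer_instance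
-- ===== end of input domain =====

-- B replaces A's three hand-written nested loops by one depth-counted recursive merge helper
-- (objective: simpler decomposition, same cost). Python A and B mutate new_history in place;
-- the equivalence proved here is about the RETURN value (in Lean both are pure).

-- ===== PORT A =====
-- Shared dict primitives: thin wrappers of PySem.Dict over the association lists of the signature.
abbrev D1 : Type := List (String × String)
abbrev D2 : Type := List (String × D1)
abbrev D3 : Type := List (String × D2)

def dget? {α : Type} (l : List (String × α)) (k : String) : Option α := (PySem.Dict.mk l).get? k
-- Python's item read `d[k]` is ported as getD with default []; at every use below the key is
-- known present (guarded by the surrounding `in` checks), so this is exact.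
def dgetD {α : Type} (l : List (String × List α)) (k : String) : List α := (PySem.Dict.mk l).getD k []
def dinsert {α : Type} (l : List (String × α)) (k : String) (v : α) : List (String × α) := ((PySem.Dict.mk l).insert k v).items
-- In-place assignment through a path (`new[nb][eng] = x`) is an update of the outer dict at nb.
def dmodify {α : Type} (l : List (String × α)) (k : String) (dflt : α) (f : α → α) : List (String × α) := ((PySem.Dict.mk l).modify k dflt f).items

-- innermost loop body: `if date_key not in new[nb][eng]: new[nb][eng][date_key] = check_id`
def aStep3 (nb eng : String) (nh : D3) (r : String × String) : D3 :=
  match dget? (dgetD (dgetD nh nb) eng) r.1 with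
  | none => dmodify nh nb [] (fun cur => dmodify cur eng [] (fun c2 => dinsert c2 r.1 r.2))
  | some _ => nh

-- middle loop body: `if engine not in new[nb]: new[nb][engine] = checks; continue; for date_key…`
def aStep2 (nb : String) (nh : D3) (q : String × D1) : D3 :=
  match dget? (dgetD nh nb) q.1 with
  | none => dmodify nh nb [] (fun cur => dinsert cur q.1 q.2)
  | some _ => q.2.foldl (aStep3 nb q.1) nh

-- outer loop body: `if nb_name not in new: new[nb_name] = engine_x_checks; continue; for engine…`
def aStep1 (nh : D3) (p : String × D2) : D3 :=
  match dget? nh p.1 with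
  | none => dinsert nh p.1 p.2
  | some _ => p.2.foldl (aStep2 p.1) nh

def merge_histories_py (old_history : List (String × List (String × List (String × String)))) (new_history : List (String × List (String × List (String × String)))) : List (String × List (String × List (String × String))) :=
  old_history.foldl aStep1 new_history

-- ===== PORT B =====
-- Source B's nested-history type indexed by the depth counter: HT 0 = str, HT (d+1) = dict level.
@[reducible] def HT (n : Nat) : Type := Nat.rec String (fun _ ih => List (String × ih)) n

-- Source B's `merge(old, new, depth)`; Lean's depth index d corresponds to Python's depth = d+1
-- (the type of the values forces the split on d; at d = 0 the `elif depth > 1` branch is vacuous).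
def mergeD : (d : Nat) → List (String × HT d) → List (String × HT d) → List (String × HT d)
  | 0, old, new =>
      old.foldl (fun n p =>
        match dget? n p.1 with
        | none => dinsert n p.1 p.2
        | some _ => n) new
  | d+1, old, new =>
      old.foldl (fun n p =>
        match dget? n p.1 with
        | none => dinsert n p.1 p.2
        | some w => dinsert n p.1 (mergeD d p.2 w)) new

def merge_histories_py_alt (old_history : List (String × List (String × List (String × String)))) (new_history : List (String × List (String × List (String × String)))) : List (String × List (String × List (String × String))) :=
  mergeD 2 old_history new_history

-- ===== PRECONDITION & SPEC =====
abbrev nk {α : Type} (l : List (String × α)) : Prop := (l.map Prod.fst).Nodup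
abbrev NK2 (l : D2) : Prop := nk l ∧ ∀ q ∈ l, nk q.2
abbrev NK3 (l : D3) : Prop := nk l ∧ ∀ p ∈ l, NK2 p.2
-- Pre_ excludes association lists with duplicate keys at some level: such lists do not encode
-- any Python dict (dict keys are unique), so no Python input is excluded.
def Pre_merge_histories_py (old_history : List (String × List (String × List (String × String)))) (new_history : List (String × List (String × List (String × String)))) : Prop :=
  NK3 old_history ∧ NK3 new_history
instance (old_history : List (String × List (String × List (String × String)))) (new_history : List (String × List (String × List (String × String)))) : Decidable (Pre_merge_histories_py old_history new_history) := by unfold Pre_merge_histories_py; infer_instance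
def pvWitness_merge_histories_py : (List (String × List (String × List (String × String)))) × (List (String × List (String × List (String × String)))) :=
  ([("nb", [("bq", [("d1", "c1")])])], [("nb", [("bq", [("d2", "c2")]), ("pg", [("d1", "c3")])])])
def Spec_merge_histories_py (old_history : List (String × List (String × List (String × String)))) (new_history : List (String × List (String × List (String × String)))) (out : List (String × List (String × List (String × String)))) : Prop := out = merge_histories_py_alt old_history new_history
instance (old_history : List (String × List (String × List (String × String)))) (new_history : List (String × List (String × List (String × String)))) (out : List (String × List (String × List (String × String)))) : Decidable (Spec_merge_histories_py old_history new_history out) := by unfold Spec_merge_histories_py; infer_instance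

-- ===== CLAIM (what is proved, stated in full; the proofs are below) =====
def Claim_equal_merge_histories_py : Prop := ∀ (old_history : List (String × List (String × List (String × String)))) (new_history : List (String × List (String × List (String × String)))), Dom_merge_histories_py old_history new_history → Pre_merge_histories_py old_history new_history → Spec_merge_histories_py old_history new_history (merge_histories_py old_history new_history)

-- ===== LEMMAS AND PROOFS =====

lemma dget?_dinsert_self {α : Type} (l : List (String × α)) (k : String) (v : α) :
    dget? (dinsert l k v) k = some v := by
  show ((PySem.Dict.mk l).insert k v).get? k = some v
  exact PySem.Dict.get?_insert_self _ _ _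

lemma dinsert_dinsert {α : Type} (l : List (String × α)) (k : String) (v w : α) :
    dinsert (dinsert l k v) k w = dinsert l k w := by
  show (((PySem.Dict.mk l).insert k v).insert k w).items = ((PySem.Dict.mk l).insert k w).items
  rw [PySem.Dict.insert_insert_self]

lemma dgetD_of_get? {α : Type} {l : List (String × List α)} {k : String} {v : List α}
    (h : dget? l k = some v) : dgetD l k = v := by
  have h' : (PySem.Dict.mk l).get? k = some v := h
  simp [dgetD, PySem.Dict.getD, h']

lemma dmodify_of_get? {α : Type} {l : List (String × α)} {k : String} {v : α}
    (h : dget? l k = some v) (dflt : α) (f : α → α) :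
    dmodify l k dflt f = dinsert l k (f v) := by
  have h' : (PySem.Dict.mk l).get? k = some v := h
  simp [dmodify, dinsert, PySem.Dict.modify, PySem.Dict.getD, h']

lemma dget?_mem {α : Type} {l : List (String × α)} {k : String} {v : α}
    (h : dget? l k = some v) : (k, v) ∈ l :=
  PySem.Dict.mem_items_of_get?_eq_some (d := PySem.Dict.mk l) h

lemma mem_dinsert {α : Type} {l : List (String × α)} {k : String} {v : α} {p : String × α}
    (h : p ∈ dinsert l k v) : p = (k, v) ∨ p ∈ l := by
  have := (PySem.Dict.mem_items_insert (d := PySem.Dict.mk l) (k := k) (v := v) (p := p)).mp h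
  tauto

lemma dinsert_of_some {α : Type} {l : List (String × α)} {k : String} {v' : α} (v : α)
    (h : dget? l k = some v') :
    dinsert l k v = l.map (fun p => if p.1 == k then (k, v) else p) := by
  have hc : (PySem.Dict.mk l).contains k = true := by
    rw [PySem.Dict.contains_eq_isSome_get?]
    have h' : (PySem.Dict.mk l).get? k = some v' := h
    simp [h']
  simp [dinsert, PySem.Dict.insert, hc]

lemma dinsert_of_none {α : Type} {l : List (String × α)} {k : String} (v : α)
    (h : dget? l k = none) : dinsert l k v = l ++ [(k, v)] := by
  have hc : (PySem.Dict.mk l).contains k = false := by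
    rw [PySem.Dict.contains_eq_isSome_get?]
    have h' : (PySem.Dict.mk l).get? k = none := h
    simp [h']
  simp [dinsert, PySem.Dict.insert, hc]

lemma map_fst_subst {α : Type} (k : String) (v : α) (l : List (String × α)) :
    (l.map (fun p => if p.1 == k then (k, v) else p)).map Prod.fst = l.map Prod.fst := by
  induction l with
  | nil => rfl
  | cons a t ih =>
      simp only [List.map_cons, ih]
      congr 1
      by_cases hak : a.1 == k
      · have h1 : a.1 = k := by simpa using hak
        simp [h1]
      · simp [hak]

lemma nk_dinsert {α : Type} {l : List (String × α)} (k : String) (v : α)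
    (h : nk l) : nk (dinsert l k v) := by
  cases hg : dget? l k with
  | some w =>
      rw [dinsert_of_some v hg]
      show ((l.map (fun p => if p.1 == k then (k, v) else p)).map Prod.fst).Nodup
      rw [map_fst_subst]
      exact h
  | none =>
      rw [dinsert_of_none v hg]
      have hfind : l.find? (fun p => p.1 == k) = none := by
        have h' : Option.map Prod.snd (l.find? (fun p => p.1 == k)) = none := hg
        exact Option.map_eq_none_iff.mp h'
      have hkn : k ∉ l.map Prod.fst := by
        intro hmem
        rcases List.mem_map.mp hmem with ⟨p, hp, hpk⟩
        have := List.find?_eq_none.mp hfind p hp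
        simp [hpk] at this
      show ((l ++ [(k, v)]).map Prod.fst).Nodup
      simp only [List.map_append, List.map_cons, List.map_nil, List.nodup_append]
      refine ⟨h, List.nodup_singleton _, ?_⟩
      intro x hx y hy
      have hyk : y = k := by simpa using hy
      subst hyk
      exact fun hxk => hkn (hxk ▸ hx)

lemma map_subst_self {α : Type} (k : String) (v : α) :
    ∀ (l : List (String × α)), (l.map Prod.fst).Nodup →
      l.find? (fun p => p.1 == k) = some (k, v) →
      l.map (fun p => if p.1 == k then (k, v) else p) = l := by
  intro l
  induction l with
  | nil => intro _ h; simp at h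
  | cons a t ih =>
      intro hn hf
      rw [List.map_cons] at hn
      have hnd := List.nodup_cons.mp hn
      rw [List.find?_cons] at hf
      by_cases hak : a.1 == k
      · simp only [hak] at hf
        have hfa : a = (k, v) := Option.some_inj.mp hf
        have hk1 : a.1 = k := by rw [hfa]
        have hkt : ∀ p ∈ t, (p.1 == k) = false := by
          intro p hp
          have hne : p.1 ≠ k := by
            intro hpk
            exact (hk1 ▸ hnd.1) (List.mem_map.mpr ⟨p, hp, hpk⟩)
          simpa using hne
        have ht : t.map (fun p => if p.1 == k then (k, v) else p) = t := by
          conv_rhs => rw [← List.map_id t]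
          apply List.map_congr_left
          intro p hp
          simp [hkt p hp]
        rw [List.map_cons, if_pos hak, ht, ← hfa]
      · have hakf : (a.1 == k) = false := by simpa using hak
        simp only [hakf] at hf
        have ht := ih hnd.2 hf
        rw [List.map_cons, if_neg hak, ht]

lemma dinsert_self {α : Type} {l : List (String × α)} {k : String} {v : α}
    (h : dget? l k = some v) (hn : nk l) : dinsert l k v = l := by
  rw [dinsert_of_some v h]
  apply map_subst_self
  · exact hn
  · have h' : Option.map Prod.snd (l.find? (fun p => p.1 == k)) = some v := h
    rcases Option.map_eq_some_iff.mp h' with ⟨q, hq, hqv⟩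
    have hq1 : q.1 = k := by
      have := List.find?_some hq
      simpa using this
    have hq' : q = (k, v) := by
      cases q
      simp_all
    rw [← hq']
    exact hq

lemma nk_mergeD0 (checks : D1) : ∀ (c2 : D1), nk c2 → nk (mergeD 0 checks c2) := by
  induction checks with
  | nil => intro c2 h; simpa [mergeD] using h
  | cons r rest ih =>
      intro c2 h
      cases hr : dget? c2 r.1 with
      | none =>
          have e : mergeD 0 (r :: rest) c2 = mergeD 0 rest (dinsert c2 r.1 r.2) := by
            simp [mergeD, hr]
          rw [e]
          exact ih _ (nk_dinsert _ _ h)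
      | some w =>
          have e : mergeD 0 (r :: rest) c2 = mergeD 0 rest c2 := by simp [mergeD, hr]
          rw [e]
          exact ih _ h

lemma NK2_dinsert {cur : D2} {eng : String} {checks : D1}
    (h : NK2 cur) (hc : nk checks) : NK2 (dinsert cur eng checks) := by
  refine ⟨nk_dinsert _ _ h.1, ?_⟩
  intro q hq
  rcases mem_dinsert hq with hq | hq
  · rw [hq]; exact hc
  · exact h.2 q hq

lemma NK2_mergeD1 (exc : D2) : ∀ (cur : D2), NK2 cur → (∀ q ∈ exc, nk q.2) →
    NK2 (mergeD 1 exc cur) := by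
  induction exc with
  | nil => intro cur h _; simpa [mergeD] using h
  | cons q rest ih =>
      intro cur h hexc
      cases hq : dget? cur q.1 with
      | none =>
          have e : mergeD 1 (q :: rest) cur = mergeD 1 rest (dinsert cur q.1 q.2) := by
            simp [mergeD, hq]
          rw [e]
          exact ih _ (NK2_dinsert h (hexc q List.mem_cons_self))
            (fun r hr => hexc r (List.mem_cons_of_mem _ hr))
      | some w =>
          have e : mergeD 1 (q :: rest) cur
              = mergeD 1 rest (dinsert cur q.1 (mergeD 0 q.2 w)) := by
            simp [mergeD, hq]
          rw [e]
          have hw : nk w := h.2 (q.1, w) (dget?_mem hq)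
          exact ih _ (NK2_dinsert h (nk_mergeD0 _ _ hw))
            (fun r hr => hexc r (List.mem_cons_of_mem _ hr))

lemma inner_loop (nb eng : String) (checks : D1) :
    ∀ (nh : D3) (cur : D2) (c2 : D1), nk nh → nk cur → nk c2 →
      dget? nh nb = some cur → dget? cur eng = some c2 →
      checks.foldl (aStep3 nb eng) nh = dinsert nh nb (dinsert cur eng (mergeD 0 checks c2)) := by
  induction checks with
  | nil =>
      intro nh cur c2 h1 h2 h3 hg1 hg2
      have e0 : mergeD 0 [] c2 = c2 := by simp [mergeD]
      simp only [List.foldl_nil, e0]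
      rw [dinsert_self hg2 h2, dinsert_self hg1 h1]
  | cons r rest ih =>
      intro nh cur c2 h1 h2 h3 hg1 hg2
      have e1 : dgetD nh nb = cur := dgetD_of_get? hg1
      have e2 : dgetD cur eng = c2 := dgetD_of_get? hg2
      rw [List.foldl_cons]
      cases hr : dget? c2 r.1 with
      | some w =>
          have hstep : aStep3 nb eng nh r = nh := by simp [aStep3, e1, e2, hr]
          have emd : mergeD 0 (r :: rest) c2 = mergeD 0 rest c2 := by simp [mergeD, hr]
          rw [hstep, ih nh cur c2 h1 h2 h3 hg1 hg2, emd]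
      | none =>
          have hstep : aStep3 nb eng nh r
              = dinsert nh nb (dinsert cur eng (dinsert c2 r.1 r.2)) := by
            simp [aStep3, e1, e2, hr, dmodify_of_get? hg1, dmodify_of_get? hg2]
          have emd : mergeD 0 (r :: rest) c2 = mergeD 0 rest (dinsert c2 r.1 r.2) := by
            simp [mergeD, hr]
          rw [hstep, emd]
          rw [ih (dinsert nh nb (dinsert cur eng (dinsert c2 r.1 r.2)))
                (dinsert cur eng (dinsert c2 r.1 r.2)) (dinsert c2 r.1 r.2)
                (nk_dinsert _ _ h1) (nk_dinsert _ _ h2) (nk_dinsert _ _ h3)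
                (dget?_dinsert_self _ _ _) (dget?_dinsert_self _ _ _)]
          rw [dinsert_dinsert, dinsert_dinsert]

lemma mid_loop (nb : String) (exc : D2) :
    ∀ (nh : D3) (cur : D2), nk nh → NK2 cur → (∀ q ∈ exc, nk q.2) →
      dget? nh nb = some cur →
      exc.foldl (aStep2 nb) nh = dinsert nh nb (mergeD 1 exc cur) := by
  induction exc with
  | nil =>
      intro nh cur h1 h2 _ hg
      have e0 : mergeD 1 [] cur = cur := by simp [mergeD]
      simp only [List.foldl_nil, e0]
      rw [dinsert_self hg h1]
  | cons q rest ih =>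
      intro nh cur h1 h2 hexc hg
      have e1 : dgetD nh nb = cur := dgetD_of_get? hg
      rw [List.foldl_cons]
      cases hq : dget? cur q.1 with
      | none =>
          have hstep : aStep2 nb nh q = dinsert nh nb (dinsert cur q.1 q.2) := by
            simp [aStep2, e1, hq, dmodify_of_get? hg]
          have emd : mergeD 1 (q :: rest) cur = mergeD 1 rest (dinsert cur q.1 q.2) := by
            simp [mergeD, hq]
          rw [hstep, emd]
          rw [ih (dinsert nh nb (dinsert cur q.1 q.2)) (dinsert cur q.1 q.2)
                (nk_dinsert _ _ h1) (NK2_dinsert h2 (hexc q List.mem_cons_self))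
                (fun r hr => hexc r (List.mem_cons_of_mem _ hr)) (dget?_dinsert_self _ _ _)]
          rw [dinsert_dinsert]
      | some c2 =>
          have hc2 : nk c2 := h2.2 (q.1, c2) (dget?_mem hq)
          have hstep : aStep2 nb nh q = q.2.foldl (aStep3 nb q.1) nh := by
            simp [aStep2, e1, hq]
          rw [hstep, inner_loop nb q.1 q.2 nh cur c2 h1 h2.1 hc2 hg hq]
          have emd : mergeD 1 (q :: rest) cur
              = mergeD 1 rest (dinsert cur q.1 (mergeD 0 q.2 c2)) := by
            simp [mergeD, hq]
          rw [emd]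
          rw [ih (dinsert nh nb (dinsert cur q.1 (mergeD 0 q.2 c2)))
                (dinsert cur q.1 (mergeD 0 q.2 c2))
                (nk_dinsert _ _ h1) (NK2_dinsert h2 (nk_mergeD0 _ _ hc2))
                (fun r hr => hexc r (List.mem_cons_of_mem _ hr)) (dget?_dinsert_self _ _ _)]
          rw [dinsert_dinsert]

lemma top_loop (old : D3) :
    ∀ (nh : D3), NK3 nh → (∀ p ∈ old, NK2 p.2) →
      old.foldl aStep1 nh = mergeD 2 old nh := by
  induction old with
  | nil => intro nh _ _; simp [mergeD]
  | cons p rest ih =>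
      intro nh hnh hold
      rw [List.foldl_cons]
      cases hg : dget? nh p.1 with
      | none =>
          have hstep : aStep1 nh p = dinsert nh p.1 p.2 := by simp [aStep1, hg]
          have emd : mergeD 2 (p :: rest) nh = mergeD 2 rest (dinsert nh p.1 p.2) := by
            simp [mergeD, hg]
          rw [hstep, emd]
          apply ih
          · refine ⟨nk_dinsert _ _ hnh.1, ?_⟩
            intro r hr
            rcases mem_dinsert hr with hr | hr
            · rw [hr]; exact hold p List.mem_cons_self
            · exact hnh.2 r hr
          · exact fun r hr => hold r (List.mem_cons_of_mem _ hr)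
      | some cur =>
          have hcur : NK2 cur := hnh.2 (p.1, cur) (dget?_mem hg)
          have hstep : aStep1 nh p = p.2.foldl (aStep2 p.1) nh := by simp [aStep1, hg]
          rw [hstep,
              mid_loop p.1 p.2 nh cur hnh.1 hcur (hold p List.mem_cons_self).2 hg]
          have emd : mergeD 2 (p :: rest) nh
              = mergeD 2 rest (dinsert nh p.1 (mergeD 1 p.2 cur)) := by
            simp [mergeD, hg]
          rw [emd]
          apply ih
          · refine ⟨nk_dinsert _ _ hnh.1, ?_⟩
            intro r hr
            rcases mem_dinsert hr with hr | hr
            · rw [hr]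
              exact NK2_mergeD1 p.2 cur hcur (hold p List.mem_cons_self).2
            · exact hnh.2 r hr
          · exact fun r hr => hold r (List.mem_cons_of_mem _ hr)

-- ===== VERDICT (by name: the statement is the Claim_ definition above) =====
theorem merge_histories_py_spec : Claim_equal_merge_histories_py := by
  intro old new _ hpre
  show merge_histories_py old new = merge_histories_py_alt old new
  exact top_loop old new hpre.2 (fun p hp => hpre.1.2 p hp)
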